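-- pv_equiv track=rewrite | github.com/mariosanchez5/Ejercicios_con_Python | Pukamon.py | pukamones_desventaja
-- ===== SOURCE A (Python) =====
-- def pukamones_desventaja(pukadex,relacion,pukamon):
--     lista = []
--     for llave, valor in pukadex.items():
--         if llave == pukamon:
--             tipo1,tipo2,num = valor
--             for llave2, valor2 in relacion.items():
--                 if tipo1 == llave2 or tipo2 == llave2:
--                     for desv in valor2:
--                         for llave_1, valor_1 in pukadex.items():
--                             tipo1_2, tipo2_2, num2 = valor_1
--                             if desv == tipo1_2 or desv == tipo2_2:
--                                 lista.append((int(num2),llave_1))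
--     return(lista)
-- ===== SOURCE B (Python) =====
-- def pukamones_desventaja(pukadex, relacion, pukamon):
--     valor = pukadex.get(pukamon)
--     if valor is None:
--         return []
--     tipo1, tipo2, _ = valor
--     by_type = {}
--     for name, (t1, t2, n) in pukadex.items():
--         by_type.setdefault(t1, []).append((int(n), name))
--         if t2 != t1:
--             by_type.setdefault(t2, []).append((int(n), name))
--     out = []
--     for t, disadvantaged in relacion.items():
--         if t == tipo1 or t == tipo2:
--             for d in disadvantaged:
--                 out.extend(by_type.get(d, []))
--     return out
-- ===== Notes on version B (the rewrite author's own statement) =====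
-- stated objective: alternative
-- what changed: B replaces A's quadruple-nested scans (rescanning the whole pukadex for the target key and again for every disadvantaged type) by one direct dict lookup of the pukamon plus a type->[(num,name)] index built in one pass, so each disadvantaged type is answered by a lookup; asymptotically lighter (O(P+R*D+output) vs O(P^2*R*D)) but not measurably faster on a timing run's inputs.
import Mathlib
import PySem

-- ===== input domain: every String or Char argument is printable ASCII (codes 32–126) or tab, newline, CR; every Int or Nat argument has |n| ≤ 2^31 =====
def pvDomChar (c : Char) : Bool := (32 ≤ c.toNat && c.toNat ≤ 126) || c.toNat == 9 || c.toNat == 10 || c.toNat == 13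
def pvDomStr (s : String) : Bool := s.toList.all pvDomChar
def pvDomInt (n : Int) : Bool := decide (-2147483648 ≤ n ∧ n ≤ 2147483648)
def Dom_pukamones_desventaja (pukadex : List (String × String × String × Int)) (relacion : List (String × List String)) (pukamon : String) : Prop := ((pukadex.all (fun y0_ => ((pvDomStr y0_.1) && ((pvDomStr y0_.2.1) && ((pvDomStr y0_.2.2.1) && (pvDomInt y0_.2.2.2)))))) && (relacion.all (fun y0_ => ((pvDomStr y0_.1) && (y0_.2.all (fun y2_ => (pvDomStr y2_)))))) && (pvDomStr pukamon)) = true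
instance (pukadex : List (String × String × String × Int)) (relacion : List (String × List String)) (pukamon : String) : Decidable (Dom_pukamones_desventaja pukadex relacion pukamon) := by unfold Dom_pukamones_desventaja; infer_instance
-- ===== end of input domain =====

-- B replaces A's nested rescans of the pukadex by one direct lookup of the pukamon
-- plus a type→[(num,name)] index built in a single pass (objective: alternative).

-- ===== PORT A =====
-- literal transliteration: four nested loops over the assoc lists (dict iteration order = list order)
def pukamones_desventaja (pukadex : List (String × String × String × Int)) (relacion : List (String × List String)) (pukamon : String) : List (Int × String) :=
  pukadex.foldl (fun lista llv =>
    if llv.1 == pukamon then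
      -- tipo1 = llv.2.1, tipo2 = llv.2.2.1, num = llv.2.2.2
      relacion.foldl (fun lista lv2 =>
        if llv.2.1 == lv2.1 || llv.2.2.1 == lv2.1 then
          lv2.2.foldl (fun lista desv =>
            pukadex.foldl (fun lista lv1 =>
              if desv == lv1.2.1 || desv == lv1.2.2.1 then
                lista ++ [(lv1.2.2.2, lv1.1)]   -- int(num2) on an int is the identity
              else lista) lista) lista
        else lista) lista
    else lista) []

-- ===== PORT B =====
-- by_type.setdefault(t, []).append(x)  ==  by_type[t] = by_type.get(t, []) + [x]  ==  Dict.modify t [] (· ++ [x])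
def pdAltByType (pukadex : List (String × String × String × Int)) : PySem.Dict String (List (Int × String)) :=
  pukadex.foldl (fun d e =>
    let d1 := d.modify e.2.1 [] (· ++ [(e.2.2.2, e.1)])
    if e.2.2.1 != e.2.1 then d1.modify e.2.2.1 [] (· ++ [(e.2.2.2, e.1)]) else d1)
    PySem.Dict.empty

def pukamones_desventaja_alt (pukadex : List (String × String × String × Int)) (relacion : List (String × List String)) (pukamon : String) : List (Int × String) :=
  match (PySem.Dict.mk pukadex).get? pukamon with    -- pukadex.get(pukamon)
  | none => []
  | some v =>
    let byType := pdAltByType pukadex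
    relacion.foldl (fun out td =>
      if td.1 == v.1 || td.1 == v.2.1 then
        td.2.foldl (fun out d => out ++ byType.getD d []) out
      else out) []

-- ===== PRECONDITION & SPEC =====
-- Pre_ excludes association lists with duplicate keys: a Python dict can never contain
-- duplicate keys, so such list inputs correspond to no input of the original program.
def Pre_pukamones_desventaja (pukadex : List (String × String × String × Int)) (relacion : List (String × List String)) (pukamon : String) : Prop :=
  (pukadex.map Prod.fst).Nodup ∧ (relacion.map Prod.fst).Nodup
instance (pukadex : List (String × String × String × Int)) (relacion : List (String × List String)) (pukamon : String) : Decidable (Pre_pukamones_desventaja pukadex relacion pukamon) := by unfold Pre_pukamones_desventaja; infer_instance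

def pvWitness_pukamones_desventaja : (List (String × String × String × Int)) × (List (String × List String)) × String :=
  ([("pika", "a", "b", 7), ("bulbo", "b", "b", 3)], [("a", ["b"]), ("c", ["a"])], "pika")

def Spec_pukamones_desventaja (pukadex : List (String × String × String × Int)) (relacion : List (String × List String)) (pukamon : String) (out : List (Int × String)) : Prop := out = pukamones_desventaja_alt pukadex relacion pukamon
instance (pukadex : List (String × String × String × Int)) (relacion : List (String × List String)) (pukamon : String) (out : List (Int × String)) : Decidable (Spec_pukamones_desventaja pukadex relacion pukamon out) := by unfold Spec_pukamones_desventaja; infer_instance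

-- ===== CLAIM (what is proved, stated in full; the proofs are below) =====
def Claim_equal_pukamones_desventaja : Prop := ∀ (pukadex : List (String × String × String × Int)) (relacion : List (String × List String)) (pukamon : String), Dom_pukamones_desventaja pukadex relacion pukamon → Pre_pukamones_desventaja pukadex relacion pukamon → Spec_pukamones_desventaja pukadex relacion pukamon (pukamones_desventaja pukadex relacion pukamon)

-- ===== LEMMAS AND PROOFS =====

-- invariant of B's index-building loop
theorem pdAltByType_getD_aux (l : List (String × String × String × Int))
    (d : PySem.Dict String (List (Int × String))) (t : String) :
    (l.foldl (fun d e =>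
      let d1 := d.modify e.2.1 [] (· ++ [(e.2.2.2, e.1)])
      if e.2.2.1 != e.2.1 then d1.modify e.2.2.1 [] (· ++ [(e.2.2.2, e.1)]) else d1) d).getD t []
    = d.getD t [] ++ (l.filter (fun e => t == e.2.1 || t == e.2.2.1)).map (fun e => (e.2.2.2, e.1)) := by
  induction l generalizing d with
  | nil => simp
  | cons e l ih =>
    rw [List.foldl_cons, ih, List.filter_cons]
    by_cases h12 : e.2.2.1 = e.2.1
    · simp only [h12, bne_self_eq_false, Bool.false_eq_true, if_false, PySem.Dict.getD_modify]
      by_cases ht : t = e.2.1 <;> simp [ht]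
    · simp only [bne_iff_ne, ne_eq, h12, not_false_eq_true, if_true, PySem.Dict.getD_modify]
      by_cases ht1 : t = e.2.1 <;> by_cases ht2 : t = e.2.2.1 <;> simp_all

-- the index lookup returns exactly the matching pukadex entries, in pukadex order
theorem pdAltByType_getD (pukadex : List (String × String × String × Int)) (t : String) :
    (pdAltByType pukadex).getD t []
      = (pukadex.filter (fun e => t == e.2.1 || t == e.2.2.1)).map (fun e => (e.2.2.2, e.1)) := by
  rw [pdAltByType, pdAltByType_getD_aux]
  simp

-- A's outer loop is the identity on a stretch with no matching key …
theorem foldA_nomatch (pukamon : String)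
    (F : (String × String × String × Int) → List (Int × String) → List (Int × String)) :
    ∀ (l : List (String × String × String × Int)) (lista : List (Int × String)),
    pukamon ∉ l.map Prod.fst →
    l.foldl (fun acc e => if e.1 == pukamon then F e acc else acc) lista = lista := by
  intro l
  induction l with
  | nil => simp
  | cons e l ih =>
    intro lista h
    simp only [List.map_cons, List.mem_cons, not_or] at h
    rw [List.foldl_cons, if_neg (by simp [beq_iff_eq]; exact fun he => h.1 he.symm), ih _ h.2]

-- … so under Nodup keys it is B's first-match dict lookup
theorem foldA_get? (pukamon : String)
    (F : (String × String × String × Int) → List (Int × String) → List (Int × String)) :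
    ∀ (l : List (String × String × String × Int)) (lista : List (Int × String)),
    (l.map Prod.fst).Nodup →
    l.foldl (fun acc e => if e.1 == pukamon then F e acc else acc) lista
    = match (PySem.Dict.mk l).get? pukamon with
      | none => lista
      | some v => F (pukamon, v) lista := by
  intro l
  induction l with
  | nil => intro lista _; simp [PySem.Dict.get?]
  | cons e l ih =>
    intro lista hnd
    simp only [List.map_cons, List.nodup_cons] at hnd
    rw [List.foldl_cons, PySem.Dict.get?_mk_cons]
    by_cases he : e.1 = pukamon
    · rw [if_pos (by simp [he]), if_pos (by simp [he])]
      rw [foldA_nomatch pukamon F l _ (he ▸ hnd.1)]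
      simp [← he]
    · rw [if_neg (by simp [he]), if_neg (by simp [he]), ih _ hnd.2]

theorem main_eq (pukadex : List (String × String × String × Int)) (relacion : List (String × List String)) (pukamon : String)
    (hnd : (pukadex.map Prod.fst).Nodup) :
    pukamones_desventaja pukadex relacion pukamon = pukamones_desventaja_alt pukadex relacion pukamon := by
  rw [pukamones_desventaja, pukamones_desventaja_alt]
  rw [foldA_get? pukamon (fun llv lista =>
      relacion.foldl (fun lista lv2 =>
        if llv.2.1 == lv2.1 || llv.2.2.1 == lv2.1 then
          lv2.2.foldl (fun lista desv =>
            pukadex.foldl (fun lista lv1 =>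
              if desv == lv1.2.1 || desv == lv1.2.2.1 then
                lista ++ [(lv1.2.2.2, lv1.1)]
              else lista) lista) lista
        else lista) lista) pukadex [] hnd]
  cases hg : (PySem.Dict.mk pukadex).get? pukamon with
  | none => rfl
  | some v =>
    simp only
    have hstep : (fun (lista : List (Int × String)) (lv2 : String × List String) =>
        if v.1 == lv2.1 || v.2.1 == lv2.1 then
          lv2.2.foldl (fun lista desv =>
            pukadex.foldl (fun lista lv1 =>
              if desv == lv1.2.1 || desv == lv1.2.2.1 then
                lista ++ [(lv1.2.2.2, lv1.1)]
              else lista) lista) lista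
        else lista)
      = (fun (out : List (Int × String)) (td : String × List String) =>
        if td.1 == v.1 || td.1 == v.2.1 then
          td.2.foldl (fun out d => out ++ (pdAltByType pukadex).getD d []) out
        else out) := by
      funext lista lv2
      rw [show (v.1 == lv2.1 || v.2.1 == lv2.1) = (lv2.1 == v.1 || lv2.1 == v.2.1) by
        rw [Bool.beq_comm (a := v.1), Bool.beq_comm (a := v.2.1)]]
      by_cases hc : (lv2.1 == v.1 || lv2.1 == v.2.1) = true
      · rw [if_pos hc, if_pos hc]
        have hfun : (fun (a : List (Int × String)) (desv : String) =>
            pukadex.foldl (fun lista lv1 =>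
              if desv == lv1.2.1 || desv == lv1.2.2.1 then
                lista ++ [(lv1.2.2.2, lv1.1)]
              else lista) a)
          = (fun (a : List (Int × String)) (d : String) => a ++ (pdAltByType pukadex).getD d []) := by
          funext a d
          rw [PySem.List.foldl_append_if, pdAltByType_getD]
        exact congrFun (congrFun (congrArg List.foldl hfun) lista) lv2.2
      · rw [if_neg hc, if_neg hc]
    exact congrFun (congrFun (congrArg List.foldl hstep) []) relacion

-- ===== VERDICT (by name: the statement is the Claim_ definition above) =====
theorem pukamones_desventaja_spec : Claim_equal_pukamones_desventaja := by
  intro pukadex relacion pukamon _dom hpre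
  exact main_eq pukadex relacion pukamon hpre.1
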